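-- pv_equiv track=rewrite | github.com/tah3in/TelegramRobots | tah3in_deutsch_bot/tah3in_deutsch_bot.py | AvoidRepetition
-- ===== SOURCE A (Python) =====
-- def AvoidRepetition(data,text):
--     lines = []
--     for line in data:
--         if '\n' in line:
--             line = line.replace('\n','')
--         lines.append(line)
--     if text not in lines:
--         return True
--     else:
--         return False
-- ===== SOURCE B (Python) =====
-- def AvoidRepetition(data, text):
--     def matches(line):
--         # two-pointer scan: compare line to text char-by-char, skipping '\n'
--         i = 0
--         for ch in line:
--             if ch == '\n':
--                 continue
--             if i >= len(text) or ch != text[i]: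
--                 return False
--             i += 1
--         return i == len(text)
--     return not any(matches(line) for line in data)
-- ===== Notes on version B (the rewrite author's own statement) =====
-- stated objective: alternative
-- what changed: Replaces A's normalize-every-line-into-a-list-then-membership-test with a character-level two-pointer matcher that walks each line while skipping newline characters and comparing directly against text, never constructing any stripped string or intermediate list, and short-circuits both per character and per line.
import Mathlib
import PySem

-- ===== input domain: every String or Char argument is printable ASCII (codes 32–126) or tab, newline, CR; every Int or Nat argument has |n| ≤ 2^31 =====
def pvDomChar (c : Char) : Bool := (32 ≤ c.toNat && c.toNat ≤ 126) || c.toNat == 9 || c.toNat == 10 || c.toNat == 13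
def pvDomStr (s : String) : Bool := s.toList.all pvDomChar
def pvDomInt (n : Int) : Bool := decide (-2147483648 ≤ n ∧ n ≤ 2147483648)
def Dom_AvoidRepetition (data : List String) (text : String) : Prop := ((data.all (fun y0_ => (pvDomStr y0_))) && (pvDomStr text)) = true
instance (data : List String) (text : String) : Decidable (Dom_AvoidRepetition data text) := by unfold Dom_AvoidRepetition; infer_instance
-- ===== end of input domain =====

-- B replaces A's build-a-stripped-list-then-membership-test with a character-level
-- two-pointer matcher that skips '\n' while comparing each line to text directly,
-- never building any stripped string or intermediate list (objective: alternative).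

-- ===== PORT A =====
def AvoidRepetition (data : List String) (text : String) : Bool :=
  let lines := data.foldl (fun lines line =>
    let line := if PySem.Str.isIn "\n" line then PySem.Str.replace line "\n" "" else line
    lines ++ [line]) []
  if !(lines.contains text) then true else false

-- ===== PORT B =====
-- `rest` is text viewed from the pointer i onward (i >= len(text) ↔ rest = [])
def pvMatches : List Char → List Char → Bool
  | [], rest => rest.isEmpty
  | c :: l, rest =>
    if c == '\n' then pvMatches l rest
    else
      match rest with
      | [] => false
      | t :: ts => if c == t then pvMatches l ts else false

def AvoidRepetition_alt (data : List String) (text : String) : Bool :=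
  !(data.any (fun line => pvMatches line.toList text.toList))

-- ===== PRECONDITION & SPEC =====
def Spec_AvoidRepetition (data : List String) (text : String) (out : Bool) : Prop := out = AvoidRepetition_alt data text
instance (data : List String) (text : String) (out : Bool) : Decidable (Spec_AvoidRepetition data text out) := by unfold Spec_AvoidRepetition; infer_instance

-- ===== CLAIM (what is proved, stated in full; the proofs are below) =====
def Claim_equal_AvoidRepetition : Prop := ∀ (data : List String) (text : String), Dom_AvoidRepetition data text → Spec_AvoidRepetition data text (AvoidRepetition data text)

-- ===== LEMMAS AND PROOFS =====

-- the matcher succeeds exactly when the newline-filtered line equals the remaining text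
theorem pvMatches_eq_filter (l rest : List Char) :
    pvMatches l rest = (l.filter (fun c => !(c == '\n')) == rest) := by
  induction l generalizing rest with
  | nil => cases rest <;> simp [pvMatches]
  | cons c l ih =>
    by_cases hc : (c == '\n') = true
    · have : c = '\n' := beq_iff_eq.mp hc
      subst this
      simp [pvMatches, ih]
    · cases rest with
      | nil => simp [pvMatches, hc]
      | cons t ts =>
        simp only [pvMatches, hc, Bool.false_eq_true, if_false, List.filter_cons,
          Bool.not_eq_eq_eq_not, Bool.not_true]
        by_cases ht : (c == t) = true
        · have : c = t := beq_iff_eq.mp ht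
          subst this
          simp [ih, List.cons_beq_cons]
        · simp [ht, List.cons_beq_cons]

-- replacing '\n' by '' is filtering out '\n'
theorem replace_go_filter (fuel : Nat) (l acc : List Char) (h : l.length ≤ fuel) :
    PySem.Chars.replace.go ['\n'] [] fuel l acc
      = acc.reverse ++ l.filter (fun c => !(c == '\n')) := by
  induction fuel generalizing l acc with
  | zero =>
    have : l = [] := List.length_eq_zero_iff.mp (Nat.le_zero.mp h)
    subst this
    simp [PySem.Chars.replace.go]
  | succ fuel ih =>
    cases l with
    | nil => simp [PySem.Chars.replace.go]
    | cons c t =>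
      rw [PySem.Chars.replace.go]
      by_cases hc : (c == '\n') = true
      · have hc' : c = '\n' := beq_iff_eq.mp hc
        subst hc'
        have hp : List.isPrefixOf ['\n'] ('\n' :: t) = true := by
          simp [List.isPrefixOf]
        rw [hp]
        simp only [if_true, List.length_cons, List.drop_succ_cons, List.length_nil,
          List.drop_zero, List.reverse_nil, List.nil_append]
        rw [ih t acc (by simpa using Nat.le_of_succ_le_succ h)]
        simp
      · have hp : List.isPrefixOf ['\n'] (c :: t) = false := by
          simp [List.isPrefixOf]
          exact fun e => hc (beq_iff_eq.mpr e.symm)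
        rw [hp]
        simp only [Bool.false_eq_true, if_false]
        rw [ih t (c :: acc) (by simpa using Nat.le_of_succ_le_succ h)]
        simp [hc]

theorem toList_strip (line : String) :
    (PySem.Str.replace line "\n" "").toList = line.toList.filter (fun c => !(c == '\n')) := by
  rw [PySem.Str.toList_replace]
  show PySem.Chars.replace line.toList ['\n'] [] = _
  unfold PySem.Chars.replace
  rw [if_neg (by simp)]
  simpa using replace_go_filter line.toList.length line.toList [] (Nat.le_refl _)

-- A's per-line conditional strip also computes the newline filter
theorem toList_stripCond (line : String) :
    (if PySem.Str.isIn "\n" line then PySem.Str.replace line "\n" "" else line).toList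
      = line.toList.filter (fun c => !(c == '\n')) := by
  by_cases h : PySem.Str.isIn "\n" line = true
  · rw [if_pos h]; exact toList_strip line
  · rw [if_neg h]
    symm
    apply List.filter_eq_self.mpr
    intro c hc
    simp only [Bool.not_eq_eq_eq_not, Bool.not_true]
    apply Bool.eq_false_iff.mpr
    intro hb
    have hce : c = '\n' := beq_iff_eq.mp hb
    subst hce
    apply h
    apply (PySem.Str.isIn_iff_infix _ _).mpr
    obtain ⟨s, t, hst⟩ := List.append_of_mem hc
    exact ⟨s, t, by simp [hst]⟩

-- pointwise: A's stripped-line equality test agrees with B's matcher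
theorem stripCond_beq_eq_pvMatches (x text : String) :
    ((if PySem.Str.isIn "\n" x then PySem.Str.replace x "\n" "" else x) == text)
      = pvMatches x.toList text.toList := by
  rw [pvMatches_eq_filter]
  apply Bool.eq_iff_iff.mpr
  simp only [beq_iff_eq]
  constructor
  · intro h'
    rw [← toList_stripCond x, h']
  · intro h'
    apply String.toList_injective
    rw [toList_stripCond x, h']

theorem foldl_strip_eq (data : List String) (acc : List String) :
    data.foldl (fun lines line =>
      let line := if PySem.Str.isIn "\n" line then PySem.Str.replace line "\n" "" else line
      lines ++ [line]) acc
      = acc ++ data.map (fun line =>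
          if PySem.Str.isIn "\n" line then PySem.Str.replace line "\n" "" else line) := by
  induction data generalizing acc with
  | nil => simp
  | cons x xs ih =>
    rw [List.foldl_cons, ih]
    simp

theorem contains_map_eq (data : List String) (text : String) :
    (data.map (fun line =>
        if PySem.Str.isIn "\n" line then PySem.Str.replace line "\n" "" else line)).contains text
      = data.any (fun line => pvMatches line.toList text.toList) := by
  induction data with
  | nil => simp
  | cons x xs ih =>
    simp only [List.map_cons, List.contains_cons, List.any_cons, ih]
    congr 1
    rw [← stripCond_beq_eq_pvMatches x text]
    apply Bool.eq_iff_iff.mpr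
    simp only [beq_iff_eq]
    exact eq_comm

-- ===== VERDICT (by name: the statement is the Claim_ definition above) =====
theorem AvoidRepetition_spec : Claim_equal_AvoidRepetition := by
  intro data text hd
  clear hd
  unfold Spec_AvoidRepetition AvoidRepetition AvoidRepetition_alt
  simp only [foldl_strip_eq data [], List.nil_append, contains_map_eq]
  cases data.any (fun line => pvMatches line.toList text.toList) <;> simp
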